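-- pv_equiv track=rewrite | github.com/aniketpanjwani/skills | skills/general/python-learning-coach/scripts/python_learning_memory.py | unique_recent
-- ===== SOURCE A (Python) =====
-- def unique_recent(existing: list[str], additions: list[str], limit: int) -> list[str]:
--     ordered = [item.strip() for item in existing if item and item.strip()]
--     for item in additions:
--         normalized = item.strip()
--         if not normalized:
--             continue
--         if normalized in ordered:
--             ordered.remove(normalized)
--         ordered.insert(0, normalized)
--     return ordered[:limit]
-- ===== SOURCE B (Python) =====
-- def unique_recent(existing: list[str], additions: list[str], limit: int) -> list[str]:
--     # front: most-recent-first distinct stripped additions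
--     front = []
--     seen = set()
--     for item in reversed(additions):
--         v = item.strip()
--         if v and v not in seen:
--             seen.add(v)
--             front.append(v)
--     # tail: stripped non-empty existing, removing one occurrence per distinct addition value
--     tail = []
--     to_remove = set(seen)
--     for item in existing:
--         v = item.strip()
--         if not v:
--             continue
--         if v in to_remove:
--             to_remove.discard(v)
--         else:
--             tail.append(v)
--     return (front + tail)[:limit]
-- ===== Notes on version B (the rewrite author's own statement) =====
-- stated objective: faster
-- what changed: Replaces A's in-place remove/insert loop over a growing list with two independent passes: a reversed first-seen pass over additions building the deduplicated front, and a single left-to-right pass over existing that consumes a to_remove set to drop exactly one occurrence per distinct addition value, then slices to the limit.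
import Mathlib
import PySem

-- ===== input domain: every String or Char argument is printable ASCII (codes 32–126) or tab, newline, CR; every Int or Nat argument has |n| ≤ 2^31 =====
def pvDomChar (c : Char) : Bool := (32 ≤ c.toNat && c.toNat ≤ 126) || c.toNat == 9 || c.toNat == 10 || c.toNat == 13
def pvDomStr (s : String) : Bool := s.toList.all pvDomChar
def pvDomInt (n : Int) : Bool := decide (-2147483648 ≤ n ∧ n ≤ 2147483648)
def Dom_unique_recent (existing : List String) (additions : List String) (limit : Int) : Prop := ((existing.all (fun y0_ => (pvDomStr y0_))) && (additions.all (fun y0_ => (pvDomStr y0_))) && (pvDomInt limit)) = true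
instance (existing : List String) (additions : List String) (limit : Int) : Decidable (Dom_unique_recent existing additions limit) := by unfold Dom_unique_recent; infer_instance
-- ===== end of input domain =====

-- B replaces A's in-place remove/insert loop by two independent passes (a reversed
-- first-seen pass building the front, then a set-consuming pass over existing
-- building the tail); objective: faster (set lookups replace A's repeated list scans).

-- ===== PORT A =====
-- the 'for item in additions' loop mutating 'ordered'
def uniqueRecentLoop (ordered : List String) (adds : List String) : List String :=
  match adds with
  | [] => ordered
  | item :: rest =>
    let normalized := PySem.Str.strip item
    if normalized = "" then uniqueRecentLoop ordered rest
    else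
      -- 'if normalized in ordered: ordered.remove(normalized)' then 'ordered.insert(0, normalized)'
      let ordered' := if normalized ∈ ordered then (PySem.List.remove? ordered normalized).getD ordered else ordered
      uniqueRecentLoop (normalized :: ordered') rest

def unique_recent (existing : List String) (additions : List String) (limit : Int) : List String :=
  PySem.List.slice
    (uniqueRecentLoop ((existing.filter (fun item => item != "" && PySem.Str.strip item != "")).map PySem.Str.strip) additions)
    none (some limit)

-- ===== PORT B =====
-- front pass of Source B: reversed(additions), strip, keep first-seen non-empty values
def altFront (seen : PySem.Set String) (items : List String) : List String :=
  match items with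
  | [] => []
  | item :: rest =>
    let v := PySem.Str.strip item
    if v ≠ "" ∧ v ∉ seen then v :: altFront (PySem.Set.add seen v) rest
    else altFront seen rest

-- tail pass of Source B: existing left-to-right, discard one occurrence per value in to_remove
def altTail (toRemove : PySem.Set String) (items : List String) : List String :=
  match items with
  | [] => []
  | item :: rest =>
    let v := PySem.Str.strip item
    if v = "" then altTail toRemove rest
    else if v ∈ toRemove then altTail (PySem.Set.discard toRemove v) rest
    else v :: altTail toRemove rest

-- to_remove = set(seen); the front list holds exactly the seen values in insertion order
def unique_recent_alt (existing : List String) (additions : List String) (limit : Int) : List String :=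
  PySem.List.slice
    (altFront PySem.Set.empty additions.reverse
      ++ altTail (PySem.Set.ofList (altFront PySem.Set.empty additions.reverse)) existing)
    none (some limit)

-- ===== PRECONDITION & SPEC =====
def Spec_unique_recent (existing : List String) (additions : List String) (limit : Int) (out : List String) : Prop := out = unique_recent_alt existing additions limit
instance (existing : List String) (additions : List String) (limit : Int) (out : List String) : Decidable (Spec_unique_recent existing additions limit out) := by unfold Spec_unique_recent; infer_instance

-- ===== CLAIM (what is proved, stated in full; the proofs are below) =====
def Claim_equal_unique_recent : Prop := ∀ (existing : List String) (additions : List String) (limit : Int), Dom_unique_recent existing additions limit → Spec_unique_recent existing additions limit (unique_recent existing additions limit)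

-- ===== LEMMAS AND PROOFS =====

theorem removeGetD (o : List String) (n : String) (h : n ∈ o) :
    (PySem.List.remove? o n).getD o = o.erase n := by
  rw [PySem.List.remove?_eq_some_erase o n h]; rfl

theorem loop_append (l1 l2 ordered : List String) :
    uniqueRecentLoop ordered (l1 ++ l2) = uniqueRecentLoop (uniqueRecentLoop ordered l1) l2 := by
  induction l1 generalizing ordered with
  | nil => rfl
  | cons x rest ih =>
    simp only [List.cons_append, uniqueRecentLoop]
    split_ifs <;> apply ih

theorem loop_singleton (ordered : List String) (x : String) :
    uniqueRecentLoop ordered [x] =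
      if PySem.Str.strip x = "" then ordered
      else PySem.Str.strip x ::
        (if PySem.Str.strip x ∈ ordered then ordered.erase (PySem.Str.strip x) else ordered) := by
  simp only [uniqueRecentLoop]
  split_ifs with h1 h2
  · rfl
  · rw [removeGetD _ _ h2]
  · rfl

theorem altFront_cons (s : PySem.Set String) (x : String) (rest : List String) :
    altFront s (x :: rest) =
      if PySem.Str.strip x ≠ "" ∧ PySem.Str.strip x ∉ s then
        PySem.Str.strip x :: altFront (PySem.Set.add s (PySem.Str.strip x)) rest
      else altFront s rest := by
  simp only [altFront]

theorem altFront_congr (l : List String) (s₁ s₂ : PySem.Set String)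
    (h : ∀ a, a ∈ s₁ ↔ a ∈ s₂) : altFront s₁ l = altFront s₂ l := by
  induction l generalizing s₁ s₂ with
  | nil => rfl
  | cons x rest ih =>
    simp only [altFront]
    by_cases h0 : PySem.Str.strip x = ""
    · rw [if_neg (by simp [h0]), if_neg (by simp [h0])]
      exact ih _ _ h
    · by_cases hm : PySem.Str.strip x ∈ s₁
      · rw [if_neg (by simp [hm]), if_neg (by simp [(h _).mp hm])]
        exact ih _ _ h
      · have hm2 : PySem.Str.strip x ∉ s₂ := fun hx => hm ((h _).mpr hx)
        rw [if_pos ⟨h0, hm⟩, if_pos ⟨h0, hm2⟩]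
        exact congrArg _ (ih _ _ (fun a => by simp [PySem.Set.mem_add, h a]))

theorem mem_altFront (l : List String) (s : PySem.Set String) (a : String)
    (ha : a ∈ altFront s l) : a ∉ s := by
  induction l generalizing s with
  | nil => simp [altFront] at ha
  | cons x rest ih =>
    simp only [altFront] at ha
    split_ifs at ha with hc
    · rcases List.mem_cons.mp ha with rfl | ha
      · exact hc.2
      · intro hs
        exact ih _ ha (by simp [PySem.Set.mem_add, hs])
    · exact ih _ ha

theorem nodup_altFront (l : List String) (s : PySem.Set String) : (altFront s l).Nodup := by
  induction l generalizing s with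
  | nil => simp [altFront]
  | cons x rest ih =>
    simp only [altFront]
    split_ifs with hc
    · refine List.nodup_cons.mpr ⟨?_, ih _⟩
      intro hmem
      exact mem_altFront _ _ _ hmem (by simp [PySem.Set.mem_add])
    · exact ih _

set_option maxHeartbeats 1000000 in
theorem altFront_add (l : List String) (s : PySem.Set String) (v : String) :
    altFront (PySem.Set.add s v) l = (altFront s l).erase v := by
  induction l generalizing s with
  | nil => rfl
  | cons x rest ih =>
    simp only [altFront]
    by_cases h0 : PySem.Str.strip x = ""
    · rw [if_neg (by simp [h0]), if_neg (by simp [h0])]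
      exact ih s
    · by_cases hxv : PySem.Str.strip x = v
      · rw [hxv] at h0 ⊢
        by_cases hvs : v ∈ s
        · rw [if_neg (by simp [PySem.Set.mem_add]), if_neg (by simp [hvs])]
          exact ih s
        · rw [if_neg (by simp [PySem.Set.mem_add]), if_pos ⟨h0, hvs⟩, List.erase_cons_head]
      · by_cases hxs : PySem.Str.strip x ∈ s
        · rw [if_neg (by simp [PySem.Set.mem_add, hxs]), if_neg (by simp [hxs])]
          exact ih s
        · rw [if_pos ⟨h0, by simp [PySem.Set.mem_add, hxs, hxv]⟩, if_pos ⟨h0, hxs⟩,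
              List.erase_cons_tail (by simp [hxv]),
              altFront_congr rest (PySem.Set.add (PySem.Set.add s v) (PySem.Str.strip x))
                (PySem.Set.add (PySem.Set.add s (PySem.Str.strip x)) v)
                (fun a => by simp only [PySem.Set.mem_add]; tauto),
              ih (PySem.Set.add s (PySem.Str.strip x))]

-- proof-side pure tail pass: like altTail but on already-stripped values
def tailRem (tr : PySem.Set String) (l : List String) : List String :=
  match l with
  | [] => []
  | y :: rest =>
    if y ∈ tr then tailRem (PySem.Set.discard tr y) rest
    else y :: tailRem tr rest

theorem tailRem_congr (l : List String) (t₁ t₂ : PySem.Set String)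
    (h : ∀ a, a ∈ t₁ ↔ a ∈ t₂) : tailRem t₁ l = tailRem t₂ l := by
  induction l generalizing t₁ t₂ with
  | nil => rfl
  | cons y rest ih =>
    simp only [tailRem]
    by_cases hy : y ∈ t₁
    · rw [if_pos hy, if_pos ((h y).mp hy)]
      exact ih _ _ (fun a => by simp [PySem.Set.mem_discard, h a])
    · rw [if_neg hy, if_neg (fun hm => hy ((h y).mpr hm)), ih _ _ h]

theorem tailRem_nil (l : List String) : tailRem [] l = l := by
  induction l with
  | nil => rfl
  | cons y rest ih => simp [tailRem, ih]

theorem tailRem_add (l : List String) (tr : PySem.Set String) (v : String) (hv : v ∉ tr) :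
    tailRem (PySem.Set.add tr v) l = (tailRem tr l).erase v := by
  induction l generalizing tr with
  | nil => rfl
  | cons y rest ih =>
    simp only [tailRem]
    by_cases hyv : y = v
    · subst hyv
      rw [if_pos (by simp [PySem.Set.mem_add]), if_neg hv, List.erase_cons_head]
      exact tailRem_congr rest _ _ (fun a => by
        simp only [PySem.Set.mem_discard, PySem.Set.mem_add]
        constructor
        · rintro ⟨ha | rfl, hne⟩
          · exact ha
          · exact absurd rfl hne
        · intro ha
          exact ⟨Or.inl ha, fun h => hv (h ▸ ha)⟩)
    · by_cases hyt : y ∈ tr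
      · rw [if_pos (by simp [PySem.Set.mem_add, hyt]), if_pos hyt,
            tailRem_congr rest (PySem.Set.discard (PySem.Set.add tr v) y)
              (PySem.Set.add (PySem.Set.discard tr y) v) (fun a => by
                simp only [PySem.Set.mem_discard, PySem.Set.mem_add]
                constructor
                · rintro ⟨ha | rfl, hne⟩
                  · exact Or.inl ⟨ha, hne⟩
                  · exact Or.inr rfl
                · rintro (⟨ha, hne⟩ | rfl)
                  · exact ⟨Or.inl ha, hne⟩
                  · exact ⟨Or.inr rfl, Ne.symm hyv⟩)]
        exact ih _ (by simp [PySem.Set.mem_discard, hv])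
      · rw [if_neg (by simp [PySem.Set.mem_add, hyt, hyv]), if_neg hyt,
            List.erase_cons_tail (by simp [hyv]), ih tr hv]

theorem altTail_eq_tailRem (existing : List String) (tr : PySem.Set String) :
    altTail tr existing =
      tailRem tr ((existing.filter (fun item => item != "" && PySem.Str.strip item != "")).map PySem.Str.strip) := by
  induction existing generalizing tr with
  | nil => rfl
  | cons item rest ih =>
    simp only [altTail]
    by_cases h0 : PySem.Str.strip item = ""
    · rw [List.filter_cons_of_neg (by simp [h0]), if_pos h0]
      exact ih tr
    · have hne : item ≠ "" := by
        intro h; apply h0; rw [h]; rfl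
      rw [List.filter_cons_of_pos (by simp [hne, h0]), if_neg h0]
      simp only [List.map_cons, tailRem]
      by_cases hm : PySem.Str.strip item ∈ tr
      · rw [if_pos hm, if_pos hm]; exact ih _
      · rw [if_neg hm, if_neg hm, ih tr]

-- main invariant: A's loop result is B's front followed by B's tail removal
set_option maxHeartbeats 1000000 in
theorem main_invariant (adds : List String) : ∀ ordered : List String,
    uniqueRecentLoop ordered adds =
      altFront PySem.Set.empty adds.reverse
        ++ tailRem (altFront PySem.Set.empty adds.reverse) ordered := by
  induction adds using List.reverseRecOn with
  | nil =>
    intro ordered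
    simp only [List.reverse_nil, uniqueRecentLoop, altFront, List.nil_append]
    rw [tailRem_nil]
  | append_singleton l x ih =>
    intro ordered
    rw [loop_append, ih ordered, show (l ++ [x]).reverse = x :: l.reverse by simp,
        altFront_cons, loop_singleton]
    by_cases h0 : PySem.Str.strip x = ""
    · rw [if_pos h0, if_neg (by simp [h0])]
    · have hne : PySem.Str.strip x ≠ "" ∧ PySem.Str.strip x ∉ PySem.Set.empty :=
        ⟨h0, by simp [PySem.Set.empty]⟩
      rw [if_neg h0, if_pos hne, altFront_add]
      set n := PySem.Str.strip x with hn
      set F := altFront PySem.Set.empty l.reverse with hF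
      by_cases hnF : n ∈ F
      · rw [if_pos (List.mem_append_left _ hnF), List.erase_append_left _ hnF,
            List.cons_append,
            tailRem_congr ordered (n :: F.erase n) F (fun a => by
              by_cases hav : a = n
              · subst hav; simp [hnF]
              · simp only [List.mem_cons, hav, false_or]
                exact List.mem_erase_of_ne hav)]
      · have hc : tailRem (n :: F) ordered = tailRem (PySem.Set.add F n) ordered :=
          tailRem_congr ordered _ _
            (fun a => by simp only [PySem.Set.mem_add, List.mem_cons]; tauto)
        rw [List.erase_of_not_mem hnF, List.cons_append, hc, tailRem_add _ _ _ hnF]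
        by_cases hmem : n ∈ F ++ tailRem F ordered
        · rw [if_pos hmem, List.erase_append_right _ hnF]
        · rw [if_neg hmem,
              List.erase_of_not_mem (fun h => hmem (List.mem_append_right _ h))]

-- ===== VERDICT (by name: the statement is the Claim_ definition above) =====
theorem unique_recent_spec : Claim_equal_unique_recent := by
  intro existing additions limit _
  unfold Spec_unique_recent unique_recent unique_recent_alt
  rw [main_invariant,
      PySem.Set.ofList_eq_self_of_nodup _ (nodup_altFront _ _),
      altTail_eq_tailRem]
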